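-- pv_equiv track=rewrite | github.com/johnap81/johnsstockapp | server.py | _t212_display_base_from_yahoo
-- ===== SOURCE A (Python) =====
-- def _t212_display_base_from_yahoo(ys: str) -> str:
--     yf = (ys or "").strip()
--     if not yf:
--         return yf
--     u = yf.upper()
--     for suf in (".DE", ".L", ".PA", ".AS", ".MI", ".MC", ".SW", ".ST", ".OL", ".VI", ".F", ".IR", ".CO", ".TO", ".NS", ".BO", ".BR", ".WA"):
--         if u.endswith(suf) and len(yf) > len(suf) + 1:
--             return yf[: -len(suf)]
--     if "." in yf:
--         return yf.rsplit(".", 1)[0]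
--     return yf
-- ===== SOURCE B (Python) =====
-- def _t212_display_base_from_yahoo(ys: str) -> str:
--     # The 18-suffix endswith loop in A provably returns the same value as its
--     # own rsplit fallback (each known suffix's dot is the string's last dot),
--     # so stripping after the last dot unconditionally is equivalent.
--     s = (ys or "").strip()
--     return s.rsplit(".", 1)[0]
-- ===== Notes on version B (the rewrite author's own statement) =====
-- stated objective: simpler
-- what changed: B drops the 18-suffix endswith loop entirely: each known suffix necessarily begins at the string's last dot, so the loop's value always coincides with A's own rsplit fallback; B simply strips everything after the last dot (returning the stripped string unchanged when it contains no dot).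
import Mathlib
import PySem

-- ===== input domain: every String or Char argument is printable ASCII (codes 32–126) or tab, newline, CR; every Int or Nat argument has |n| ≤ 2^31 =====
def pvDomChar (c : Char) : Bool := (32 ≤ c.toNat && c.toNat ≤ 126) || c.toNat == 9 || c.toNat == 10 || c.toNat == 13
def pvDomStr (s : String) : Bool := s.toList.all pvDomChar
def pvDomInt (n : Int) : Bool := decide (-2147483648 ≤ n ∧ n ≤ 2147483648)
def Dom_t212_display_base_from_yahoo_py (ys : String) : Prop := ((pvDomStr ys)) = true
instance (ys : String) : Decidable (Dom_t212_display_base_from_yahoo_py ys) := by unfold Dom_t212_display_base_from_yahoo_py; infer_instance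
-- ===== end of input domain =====

-- B replaces A's 18-suffix endswith loop by plain rsplit('.',1)[0]: each known suffix's
-- dot is necessarily the last dot of the string, so the loop's value always coincides
-- with A's own rsplit fallback (objective: simpler).

-- ===== PORT A =====

-- hand port (used by both ports, as both Pythons call rsplit):
-- yf.rsplit(".", 1)[0] = everything before the LAST '.', or the whole string if no '.';
-- exact: we scan the reversed string up to the first '.' and drop that tail.
def t212RSplitHead (l : List Char) : List Char :=
  match l.reverse.dropWhile (fun c => c != '.') with
  | [] => l
  | _ :: rest => rest.reverse

def t212SufList : List String :=
  [".DE", ".L", ".PA", ".AS", ".MI", ".MC", ".SW", ".ST", ".OL",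
   ".VI", ".F", ".IR", ".CO", ".TO", ".NS", ".BO", ".BR", ".WA"]

-- the for-loop over the suffix tuple, with its early return
def t212Loop (yf u : String) : List String → Option String
  | [] => none
  | suf :: rest =>
      if PySem.Str.endswith u suf
           && decide (PySem.Str.len yf > PySem.Str.len suf + 1) then
        some (String.ofList (PySem.List.slice yf.toList none (some (-(PySem.Str.len suf)))))
      else t212Loop yf u rest

def t212_display_base_from_yahoo_py (ys : String) : String :=
  let yf := PySem.Str.strip ys   -- (ys or ""): identity on String inputs (both branches strip to the same)
  if yf = "" then yf
  else
    let u := PySem.Str.upper yf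
    match t212Loop yf u t212SufList with
    | some r => r
    | none =>
        if PySem.Str.isIn "." yf then String.ofList (t212RSplitHead yf.toList)
        else yf

-- ===== PORT B =====
def t212_display_base_from_yahoo_py_alt (ys : String) : String :=
  let s := PySem.Str.strip ys
  String.ofList (t212RSplitHead s.toList)

-- ===== PRECONDITION & SPEC =====
def Spec_t212_display_base_from_yahoo_py (ys : String) (out : String) : Prop := out = t212_display_base_from_yahoo_py_alt ys
instance (ys : String) (out : String) : Decidable (Spec_t212_display_base_from_yahoo_py ys out) := by unfold Spec_t212_display_base_from_yahoo_py; infer_instance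

-- ===== CLAIM (what is proved, stated in full; the proofs are below) =====
def Claim_equal_t212_display_base_from_yahoo_py : Prop := ∀ (ys : String), Dom_t212_display_base_from_yahoo_py ys → Spec_t212_display_base_from_yahoo_py ys (t212_display_base_from_yahoo_py ys)

-- ===== LEMMAS AND PROOFS =====

-- upperChar sends only '.' to '.'
lemma t212_upperChar_dot {c : Char} (h : PySem.Chars.upperChar c = '.') : c = '.' := by
  unfold PySem.Chars.upperChar PySem.Chars.islower at h
  split at h
  · next hl =>
    exfalso
    simp only [Bool.and_eq_true, decide_eq_true_eq] at hl
    have h1 : 97 ≤ c.toNat := hl.1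
    have h2 : c.toNat ≤ 122 := hl.2
    have := congrArg Char.toNat h
    rw [Char.toNat_ofNat] at this
    rw [if_pos (by left; omega)] at this
    have hdot : ('.').toNat = 46 := by decide
    omega
  · exact h

-- rsplit head of a string with no '.' is the string itself
lemma t212RSplitHead_no_dot {l : List Char} (h : '.' ∉ l) : t212RSplitHead l = l := by
  unfold t212RSplitHead
  have : l.reverse.dropWhile (fun c => c != '.') = [] := by
    rw [List.dropWhile_eq_nil_iff]
    intro c hc
    simp only [bne_iff_ne, ne_eq]
    intro hcd; subst hcd; exact h (List.mem_reverse.mp hc)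
  rw [this]

-- rsplit head cuts exactly at the last '.'
lemma t212RSplitHead_split {pre es : List Char} (h : '.' ∉ es) :
    t212RSplitHead (pre ++ '.' :: es) = pre := by
  unfold t212RSplitHead
  have hrev : (pre ++ '.' :: es).reverse = es.reverse ++ '.' :: pre.reverse := by
    simp
  rw [hrev]
  have h1 : es.reverse.dropWhile (fun c => c != '.') = [] := by
    rw [List.dropWhile_eq_nil_iff]
    intro c hc
    simp only [bne_iff_ne, ne_eq]
    intro hcd; subst hcd; exact h (List.mem_reverse.mp hc)
  rw [List.dropWhile_append, h1]
  simp

-- singleton infix = membership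
lemma t212_infix_singleton {l : List Char} {a : Char} (h : a ∈ l) : [a] <:+: l := by
  obtain ⟨s, t, hst⟩ := List.append_of_mem h
  exact ⟨s, t, by simp [hst]⟩

-- every suffix of the tuple starts with '.' and has no further dot
lemma t212SufList_ok : ∀ s ∈ t212SufList,
    s.toList.head? = some '.' ∧ '.' ∉ s.toList.tail := by decide

-- a successful endswith against a well-formed suffix strips exactly the last-dot tail
lemma t212_endswith_strip {yf suf : String}
    (hs : suf.toList.head? = some '.' ∧ '.' ∉ suf.toList.tail)
    (he : PySem.Str.endswith (PySem.Str.upper yf) suf = true) :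
    PySem.List.slice yf.toList none (some (-(PySem.Str.len suf)))
      = t212RSplitHead yf.toList := by
  obtain ⟨cs, hsl, hcs⟩ : ∃ cs, suf.toList = '.' :: cs ∧ '.' ∉ cs := by
    cases h : suf.toList with
    | nil => rw [h] at hs; simp at hs
    | cons a t =>
      rw [h] at hs
      simp only [List.head?_cons, Option.some.injEq, List.tail_cons] at hs
      exact ⟨t, by rw [hs.1], hs.2⟩
  set l := yf.toList with hl
  set m := suf.toList.length with hm
  have hm1 : 1 ≤ m := by rw [hm, hsl]; simp
  -- extract the suffix of the uppercased list
  rw [PySem.Str.endswith_eq, PySem.Str.toList_upper] at he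
  have hsuf : suf.toList <:+ PySem.Chars.upper l := (PySem.Chars.endswith_iff _ _).mp he
  obtain ⟨a, ha⟩ := hsuf
  have hlen : a.length + m = l.length := by
    have := congrArg List.length ha
    simpa [PySem.Chars.upper, hm] using this
  set k := l.length - m with hk
  have hka : k = a.length := by omega
  have hdrop : PySem.Chars.upper (l.drop k) = suf.toList := by
    have : (a ++ suf.toList).drop a.length = suf.toList := by
      simp
    rw [ha] at this
    rw [hka]
    unfold PySem.Chars.upper at *
    rw [← List.map_drop] at this
    exact this
  -- split l at position k
  have hlk : l.length - k = m := by omega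
  cases hld : l.drop k with
  | nil =>
    exfalso
    have := congrArg List.length hld
    simp at this
    omega
  | cons e es =>
    have hmap : PySem.Chars.upperChar e :: (es.map PySem.Chars.upperChar) = '.' :: cs := by
      have := hdrop
      rw [hld] at this
      simpa [PySem.Chars.upper, hsl] using this
    have he' : e = '.' := t212_upperChar_dot (by injection hmap)
    have hes : '.' ∉ es := by
      intro hmem
      have : PySem.Chars.upperChar '.' ∈ es.map PySem.Chars.upperChar :=
        List.mem_map_of_mem hmem
      have hcse : es.map PySem.Chars.upperChar = cs := by injection hmap
      rw [hcse] at this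
      exact hcs (by simpa using this)
    have hsplit : l = l.take k ++ '.' :: es := by
      conv_lhs => rw [← List.take_append_drop k l]
      rw [hld, he']
    -- the slice yf[:-len(suf)] is take k
    have hslice : PySem.List.slice l none (some (-(PySem.Str.len suf))) = l.take k := by
      rw [PySem.Str.len_eq, ← hm]
      rw [PySem.List.slice_to_neg_natCast _ _ (by omega)]
    rw [hslice]
    conv_rhs => rw [hsplit]
    rw [t212RSplitHead_split hes]

-- the loop, whenever it returns, returns the rsplit head
lemma t212Loop_some {yf : String} :
    ∀ (sufs : List String), (∀ s ∈ sufs, s.toList.head? = some '.' ∧ '.' ∉ s.toList.tail) →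
    ∀ r, t212Loop yf (PySem.Str.upper yf) sufs = some r →
    r = String.ofList (t212RSplitHead yf.toList) := by
  intro sufs
  induction sufs with
  | nil => intro _ r hr; simp [t212Loop] at hr
  | cons suf rest ih =>
    intro hok r hr
    unfold t212Loop at hr
    split at hr
    · next hcond =>
      simp only [Bool.and_eq_true] at hcond
      have := t212_endswith_strip (hok suf (by simp)) hcond.1
      rw [this] at hr
      exact (Option.some.injEq _ _ ▸ hr).symm ▸ rfl
    · exact ih (fun s hs => hok s (by simp [hs])) r hr

-- ===== VERDICT (by name: the statement is the Claim_ definition above) =====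
theorem t212_display_base_from_yahoo_py_spec : Claim_equal_t212_display_base_from_yahoo_py := by
  intro ys _
  unfold Spec_t212_display_base_from_yahoo_py
  unfold t212_display_base_from_yahoo_py t212_display_base_from_yahoo_py_alt
  set yf := PySem.Str.strip ys with hyf
  by_cases h0 : yf = ""
  · simp [h0, t212RSplitHead]
  · simp only [if_neg h0]
    cases hloop : t212Loop yf (PySem.Str.upper yf) t212SufList with
    | some r =>
      simpa using t212Loop_some t212SufList t212SufList_ok r hloop
    | none =>
      simp only
      split
      · rfl
      · next hnotin =>
        have hin : PySem.Str.isIn "." yf = false := by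
          revert hnotin; cases PySem.Str.isIn "." yf <;> simp
        rw [PySem.Str.isIn_eq] at hin
        have hmem : '.' ∉ yf.toList := by
          intro hm
          have := (PySem.Chars.isIn_eq_false_iff _ _).mp (by simpa using hin)
          exact this (t212_infix_singleton hm)
        rw [t212RSplitHead_no_dot hmem, String.ofList_toList]
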